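-- pv_equiv track=rewrite | github.com/T-101/aoc17 | day04/__init__.py | day04_1
-- ===== SOURCE A (Python) =====
-- def day04_1(arr):
--     ret_arr = []
--
--     for row in arr:
--         fail = False
--         row_temp = row.split()
--         while len(row_temp):
--             test_val = row_temp.pop(0)
--             for item in row_temp:
--                 if test_val == item:
--                     fail = True
--
--         if not fail:
--             ret_arr.append(row)
--     return ret_arr
-- ===== SOURCE B (Python) =====
-- def day04_1(arr):
--     ret_arr = []
--     for row in arr:
--         words = sorted(row.split())
--         ok = True
--         for a, b in zip(words, words[1:]):
--             if a == b:
--                 ok = False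
--                 break
--         if ok:
--             ret_arr.append(row)
--     return ret_arr
-- ===== Notes on version B (the rewrite author's own statement) =====
-- stated objective: alternative
-- what changed: B sorts each row's words and does one adjacent-pair scan (with early break) instead of A's nested pop-and-compare scan over all remaining words.
import Mathlib
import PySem

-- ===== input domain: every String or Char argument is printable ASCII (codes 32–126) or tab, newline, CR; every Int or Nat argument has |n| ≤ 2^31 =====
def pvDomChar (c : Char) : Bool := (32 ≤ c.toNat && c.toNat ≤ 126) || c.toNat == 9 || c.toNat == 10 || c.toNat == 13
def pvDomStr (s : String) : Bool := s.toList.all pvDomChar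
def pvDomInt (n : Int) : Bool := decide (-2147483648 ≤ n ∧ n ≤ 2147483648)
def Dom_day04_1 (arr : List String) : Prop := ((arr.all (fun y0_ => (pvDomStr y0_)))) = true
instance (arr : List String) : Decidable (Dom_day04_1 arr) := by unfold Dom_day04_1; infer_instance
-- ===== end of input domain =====

-- B sorts each row's words and scans adjacent pairs once instead of A's nested pop-and-compare scan; return value identical.


-- ===== PORT A =====
-- the 'while len(row_temp)' loop: pop the head, sweep the rest accumulating fail
def aWhile : List String → Bool → Bool
  | [], fail => fail
  | test_val :: row_temp, fail =>
      aWhile row_temp (row_temp.foldl (fun f item => if test_val == item then true else f) fail)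

def day04_1 (arr : List String) : List String :=
  arr.foldl (fun ret_arr row =>
    if aWhile (PySem.Str.split₀ row) false = false then ret_arr ++ [row] else ret_arr) []

-- ===== PORT B =====
-- 'for a, b in zip(words, words[1:]): if a == b: ok = False; break'
def adjOk : List String → Bool
  | [] => true
  | [_] => true
  | a :: b :: t => if a == b then false else adjOk (b :: t)

def day04_1_alt (arr : List String) : List String :=
  arr.foldl (fun ret_arr row =>
    let words := PySem.List.sorted (PySem.Str.split₀ row) (fun x => x) false
    if adjOk words then ret_arr ++ [row] else ret_arr) []

-- ===== PRECONDITION & SPEC =====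
def Spec_day04_1 (arr : List String) (out : List String) : Prop := out = day04_1_alt arr
instance (arr : List String) (out : List String) : Decidable (Spec_day04_1 arr out) := by unfold Spec_day04_1; infer_instance

-- ===== CLAIM (what is proved, stated in full; the proofs are below) =====
def Claim_equal_day04_1 : Prop := ∀ (arr : List String), Dom_day04_1 arr → Spec_day04_1 arr (day04_1 arr)

-- ===== LEMMAS AND PROOFS =====

theorem foldl_sticky (x : String) (l : List String) (f : Bool) :
    l.foldl (fun f item => if x == item then true else f) f = (f || l.contains x) := by
  induction l generalizing f with
  | nil => simp
  | cons y t ih =>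
      simp only [List.foldl_cons, ih, List.contains_cons]
      by_cases h : x = y
      · simp [h]
      · have h2 : (x == y) = false := beq_eq_false_iff_ne.mpr h
        simp [h2]

theorem aWhile_eq (l : List String) (f : Bool) :
    aWhile l f = (f || !decide l.Nodup) := by
  induction l generalizing f with
  | nil => simp [aWhile]
  | cons x t ih =>
      simp only [aWhile, foldl_sticky, ih, List.nodup_cons]
      by_cases hx : x ∈ t <;> by_cases hn : t.Nodup <;>
        simp [hx, hn]

theorem adjOk_of_sorted (l : List String) (hp : l.Pairwise (· ≤ ·)) :
    adjOk l = decide l.Nodup := by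
  induction l with
  | nil => simp [adjOk]
  | cons x t ih =>
      cases t with
      | nil => simp [adjOk]
      | cons y u =>
          have hp' : (y :: u).Pairwise (· ≤ ·) := hp.sublist (List.sublist_cons_self _ _)
          by_cases hxy : x = y
          · subst hxy
            simp [adjOk, List.nodup_cons]
          · have hnotmem : x ∉ y :: u := by
              intro hm
              have hle : x ≤ y := (List.pairwise_cons.mp hp).1 y (by simp)
              rcases List.mem_cons.mp hm with rfl | hm'
              · exact hxy rfl
              · have hyx : y ≤ x := (List.pairwise_cons.mp hp').1 x hm'
                exact hxy (le_antisymm hle hyx)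
            simp only [adjOk, beq_iff_eq, if_neg hxy, ih hp', List.nodup_cons]
            simp [hnotmem]

theorem row_eq (row : String) :
    (aWhile (PySem.Str.split₀ row) false = false)
      = (adjOk (PySem.List.sorted (PySem.Str.split₀ row) (fun x => x) false) = true) := by
  have hperm := PySem.List.sorted_perm (PySem.Str.split₀ row) (fun x : String => x) false
  have hnd : (PySem.List.sorted (PySem.Str.split₀ row) (fun x : String => x) false).Nodup
      ↔ (PySem.Str.split₀ row).Nodup := hperm.nodup_iff
  rw [aWhile_eq, adjOk_of_sorted _ (PySem.List.sorted_pairwise _ _),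
    decide_eq_decide.mpr hnd]
  cases decide ((PySem.Str.split₀ row).Nodup) <;> simp

theorem foldl_eq (arr : List String) (acc : List String) :
    arr.foldl (fun ret_arr row =>
      if aWhile (PySem.Str.split₀ row) false = false then ret_arr ++ [row] else ret_arr) acc
    = arr.foldl (fun ret_arr row =>
      let words := PySem.List.sorted (PySem.Str.split₀ row) (fun x => x) false
      if adjOk words then ret_arr ++ [row] else ret_arr) acc := by
  induction arr generalizing acc with
  | nil => rfl
  | cons r t ih =>
      simp only [List.foldl_cons, row_eq r]
      exact ih _

-- ===== VERDICT (by name: the statement is the Claim_ definition above) =====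
theorem day04_1_spec : Claim_equal_day04_1 := by
  intro arr _
  unfold Spec_day04_1 day04_1 day04_1_alt
  exact foldl_eq arr []
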